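-- pv_equiv track=rewrite | github.com/preginald/sanctum-monorepo | sanctum-core/tests/test_template_milestone_sequences.py | deduplicate_sequences
-- ===== SOURCE A (Python) =====
-- def deduplicate_sequences(sequences: list[int]) -> list[int]:
--     """Pure-logic version of the create_template dedup logic."""
--     result = []
--     used = set()
--     for seq in sequences:
--         s = seq if seq else len(result) + 1
--         while s in used:
--             s += 1
--         used.add(s)
--         result.append(s)
--     return result
-- ===== SOURCE B (Python) =====
-- def deduplicate_sequences(sequences: list[int]) -> list[int]:
--     """Union-find style "next free slot" map with path compression: nxt maps an
--     occupied slot to a candidate slot at-or-above the first free slot over it."""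
--     result = []
--     nxt = {}
--     for i, seq in enumerate(sequences):
--         s = seq if seq else i + 1
--         # find the root (first free slot >= s)
--         r = s
--         while r in nxt:
--             r = nxt[r]
--         # path compression: point the chain from s at the root
--         while s in nxt:
--             t = nxt[s]
--             if t == r:
--                 break
--             nxt[s] = r
--             s = t
--         nxt[r] = r + 1
--         result.append(r)
--     return result
-- ===== Notes on version B (the rewrite author's own statement) =====
-- stated objective: faster
-- what changed: Replaces A's linear probing (increment s while it is in a set) by a union-find style 'next free slot' dictionary with path compression, so each collision chain is traversed once and then short-circuited.
import Mathlib
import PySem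

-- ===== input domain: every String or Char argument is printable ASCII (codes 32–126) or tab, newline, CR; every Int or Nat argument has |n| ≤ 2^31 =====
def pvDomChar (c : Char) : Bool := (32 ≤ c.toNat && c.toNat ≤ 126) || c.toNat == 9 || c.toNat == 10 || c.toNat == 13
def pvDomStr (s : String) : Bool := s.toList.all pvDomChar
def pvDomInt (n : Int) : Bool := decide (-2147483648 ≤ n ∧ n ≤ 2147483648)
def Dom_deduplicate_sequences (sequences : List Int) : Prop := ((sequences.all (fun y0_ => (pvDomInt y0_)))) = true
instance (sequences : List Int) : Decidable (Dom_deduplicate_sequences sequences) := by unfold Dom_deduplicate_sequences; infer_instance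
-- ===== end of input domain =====

-- B replaces A's linear probing over a plain set by a union-find "next free slot"
-- map with path compression (objective: faster on collision-heavy inputs).

-- ===== PORT A =====
-- termination helper for A's `while s in used: s += 1` loop (cited in decreasing_by)
theorem pv_filter_lt (xs : List Int) (a b : Int) (hab : a < b) (ha : a ∈ xs) :
    (xs.filter (fun x => decide (b ≤ x))).length < (xs.filter (fun x => decide (a ≤ x))).length := by
  have hsub : (xs.filter (fun x => decide (b ≤ x))).Sublist (xs.filter (fun x => decide (a ≤ x))) := by
    apply List.monotone_filter_right
    intro x hx
    simp only [decide_eq_true_eq] at *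
    omega
  have hle := hsub.length_le
  rcases lt_or_eq_of_le hle with h | h
  · exact h
  · exfalso
    have heq := hsub.eq_of_length h
    have hmem : a ∈ xs.filter (fun x => decide (a ≤ x)) := by
      simp [List.mem_filter, ha]
    rw [← heq] at hmem
    simp [List.mem_filter] at hmem
    omega

-- `while s in used: s += 1`
def probeA (used : PySem.Set Int) (s : Int) : Int :=
  if h : PySem.Set.contains used s then probeA used (s + 1) else s
termination_by (used.filter (fun x => decide (s ≤ x))).length
decreasing_by
  exact pv_filter_lt used s (s + 1) (by omega) ((PySem.Set.contains_iff used s).1 h)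

-- one iteration of A's for-loop
def dedupStepA (st : List Int × PySem.Set Int) (seq : Int) : List Int × PySem.Set Int :=
  let s0 : Int := if seq ≠ 0 then seq else (st.1.length : Int) + 1
  let s := probeA st.2 s0
  (st.1 ++ [s], PySem.Set.add st.2 s)

def deduplicate_sequences (sequences : List Int) : List Int :=
  (sequences.foldl dedupStepA ([], PySem.Set.empty)).1

-- ===== PORT B =====
-- `while r in nxt: r = nxt[r]` (fuel = nxt.size + 1 only makes the loop total; it never runs out)
def findRootB (nxt : PySem.Dict Int Int) : Nat → Int → Int
  | 0, r => r
  | fuel + 1, r =>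
    match nxt.get? r with
    | none => r
    | some y => findRootB nxt fuel y

-- `while s in nxt: t = nxt[s]; if t == r: break; nxt[s] = r; s = t` (same fuel remark)
def compressB (r : Int) : Nat → PySem.Dict Int Int → Int → PySem.Dict Int Int
  | 0, nxt, _ => nxt
  | fuel + 1, nxt, s =>
    match nxt.get? s with
    | none => nxt
    | some t => if t = r then nxt else compressB r fuel (nxt.insert s r) t

-- one iteration of B's for-loop over enumerate(sequences)
def dedupStepB (st : List Int × PySem.Dict Int Int) (p : Int × Int) : List Int × PySem.Dict Int Int :=
  let s0 : Int := if p.2 ≠ 0 then p.2 else p.1 + 1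
  let r := findRootB st.2 (st.2.size + 1) s0
  let nxt' := compressB r (st.2.size + 1) st.2 s0
  (st.1 ++ [r], nxt'.insert r (r + 1))

def deduplicate_sequences_alt (sequences : List Int) : List Int :=
  ((PySem.List.enumerate sequences 0).foldl dedupStepB ([], PySem.Dict.empty)).1

-- ===== PRECONDITION & SPEC =====
def Spec_deduplicate_sequences (sequences : List Int) (out : List Int) : Prop := out = deduplicate_sequences_alt sequences
instance (sequences : List Int) (out : List Int) : Decidable (Spec_deduplicate_sequences sequences out) := by unfold Spec_deduplicate_sequences; infer_instance

-- ===== CLAIM (what is proved, stated in full; the proofs are below) =====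
def Claim_equal_deduplicate_sequences : Prop := ∀ (sequences : List Int), Dom_deduplicate_sequences sequences → Spec_deduplicate_sequences sequences (deduplicate_sequences sequences)

-- ===== LEMMAS AND PROOFS =====

-- the union-find invariant: each stored pointer jumps upward and only over occupied slots
def InvB (nxt : PySem.Dict Int Int) : Prop :=
  ∀ x y, nxt.get? x = some y → x < y ∧ ∀ z, x ≤ z → z < y → z ∈ nxt.keys

theorem probeA_mem_step (used : PySem.Set Int) (s : Int) (h : s ∈ used) :
    probeA used s = probeA used (s + 1) := by
  rw [probeA]
  simp [h]

theorem probeA_not_mem_eq (used : PySem.Set Int) (s : Int) (h : s ∉ used) :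
    probeA used s = s := by
  rw [probeA]
  simp [h]

theorem probeA_ge (used : PySem.Set Int) (s : Int) : s ≤ probeA used s := by
  induction s using probeA.induct (used := used) with
  | case1 s h ih =>
    rw [probeA_mem_step used s ((PySem.Set.contains_iff used s).1 h)]
    omega
  | case2 s h =>
    rw [probeA_not_mem_eq used s (fun hm => h ((PySem.Set.contains_iff used s).2 hm))]

theorem probeA_not_mem (used : PySem.Set Int) (s : Int) : probeA used s ∉ used := by
  induction s using probeA.induct (used := used) with
  | case1 s h ih =>
    rw [probeA_mem_step used s ((PySem.Set.contains_iff used s).1 h)]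
    exact ih
  | case2 s h =>
    rw [probeA_not_mem_eq used s (fun hm => h ((PySem.Set.contains_iff used s).2 hm))]
    exact fun hm => h ((PySem.Set.contains_iff used s).2 hm)

theorem probeA_interval (used : PySem.Set Int) (s : Int) :
    ∀ z, s ≤ z → z < probeA used s → z ∈ used := by
  induction s using probeA.induct (used := used) with
  | case1 s h ih =>
    intro z hz1 hz2
    rw [probeA_mem_step used s ((PySem.Set.contains_iff used s).1 h)] at hz2
    rcases eq_or_lt_of_le hz1 with heq | hlt
    · rw [← heq]
      exact (PySem.Set.contains_iff used s).1 h
    · exact ih z (by omega) hz2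
  | case2 s h =>
    intro z hz1 hz2
    rw [probeA_not_mem_eq used s (fun hm => h ((PySem.Set.contains_iff used s).2 hm))] at hz2
    omega

theorem probeA_congr_interval (used : PySem.Set Int) (t : Int) :
    ∀ (s : Int), s ≤ t → (∀ z, s ≤ z → z < t → z ∈ used) → probeA used s = probeA used t := by
  have H : ∀ (n : Nat) (s : Int), (t - s).toNat = n → s ≤ t →
      (∀ z, s ≤ z → z < t → z ∈ used) → probeA used s = probeA used t := by
    intro n
    induction n with
    | zero =>
      intro s h0 hst _
      have : s = t := by omega
      rw [this]
    | succ n ih =>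
      intro s h0 hst h
      have hlt : s < t := by omega
      have hs : s ∈ used := h s le_rfl hlt
      rw [probeA_mem_step used s hs]
      exact ih (s + 1) (by omega) (by omega) (fun z hz1 hz2 => h z (by omega) hz2)
  intro s hst h
  exact H (t - s).toNat s rfl hst h

theorem mem_keys_of_get?_eq_some (nxt : PySem.Dict Int Int) (x : Int) (y : Int)
    (h : nxt.get? x = some y) : x ∈ nxt.keys := by
  by_contra hmem
  rw [(PySem.Dict.get?_eq_none_iff_not_mem_keys nxt x).2 hmem] at h
  simp at h

theorem findRootB_eq (nxt : PySem.Dict Int Int) (hInv : InvB nxt) :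
    ∀ (fuel : Nat) (s : Int),
      (nxt.keys.filter (fun x => decide (s ≤ x))).length < fuel →
      findRootB nxt fuel s = probeA nxt.keys s := by
  intro fuel
  induction fuel with
  | zero => intro s h; omega
  | succ fuel ih =>
    intro s h
    cases hg : nxt.get? s with
    | none =>
      have hmem : s ∉ nxt.keys := (PySem.Dict.get?_eq_none_iff_not_mem_keys nxt s).1 hg
      simp [findRootB, hg, probeA_not_mem_eq _ _ hmem]
    | some y =>
      obtain ⟨hxy, hint⟩ := hInv s y hg
      have hmem : s ∈ nxt.keys := mem_keys_of_get?_eq_some nxt s y hg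
      have hcong : probeA nxt.keys s = probeA nxt.keys y :=
        probeA_congr_interval nxt.keys y s (by omega) (fun z hz1 hz2 => hint z hz1 hz2)
      have hcount : (nxt.keys.filter (fun x => decide (y ≤ x))).length <
          (nxt.keys.filter (fun x => decide (s ≤ x))).length :=
        pv_filter_lt nxt.keys s y hxy hmem
      simp only [findRootB, hg]
      rw [ih y (by omega), hcong]

theorem probeA_gt_of_mem (used : PySem.Set Int) (s : Int) (h : s ∈ used) :
    s < probeA used s := by
  rw [probeA_mem_step used s h]
  have := probeA_ge used (s + 1)
  omega

theorem compressB_keeps (r : Int) :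
    ∀ (fuel : Nat) (nxt : PySem.Dict Int Int) (s : Int),
      InvB nxt → probeA nxt.keys s = r →
      (compressB r fuel nxt s).keys = nxt.keys ∧ InvB (compressB r fuel nxt s) := by
  intro fuel
  induction fuel with
  | zero => intro nxt s hInv _; exact ⟨rfl, hInv⟩
  | succ fuel ih =>
    intro nxt s hInv hp
    cases hg : nxt.get? s with
    | none =>
      have : compressB r (fuel + 1) nxt s = nxt := by simp [compressB, hg]
      rw [this]
      exact ⟨rfl, hInv⟩
    | some t =>
      by_cases ht : t = r
      · have : compressB r (fuel + 1) nxt s = nxt := by simp [compressB, hg, ht]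
        rw [this]
        exact ⟨rfl, hInv⟩
      · have hstep : compressB r (fuel + 1) nxt s = compressB r fuel (nxt.insert s r) t := by
          simp [compressB, hg, ht]
        rw [hstep]
        obtain ⟨hst, hint⟩ := hInv s t hg
        have hsmem : s ∈ nxt.keys := mem_keys_of_get?_eq_some nxt s t hg
        have hcont : nxt.contains s = true := (PySem.Dict.contains_iff_mem_keys nxt s).2 hsmem
        have hkeys : (nxt.insert s r).keys = nxt.keys :=
          PySem.Dict.keys_insert_of_contains nxt r hcont
        have hsr : s < r := by
          rw [← hp]
          exact probeA_gt_of_mem nxt.keys s hsmem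
        have hInv' : InvB (nxt.insert s r) := by
          intro x y hxy
          rw [PySem.Dict.get?_insert] at hxy
          by_cases hx : x = s
          · refine ⟨?_, ?_⟩
            · simp only [hx, if_true] at hxy
              cases hxy
              omega
            · intro z hz1 hz2
              simp only [hx, if_true] at hxy
              cases hxy
              rw [hkeys]
              subst hx
              exact probeA_interval nxt.keys x z hz1 (by rw [hp]; omega)
          · simp only [hx, if_false] at hxy
            obtain ⟨h1, h2⟩ := hInv x y hxy
            exact ⟨h1, fun z hz1 hz2 => by rw [hkeys]; exact h2 z hz1 hz2⟩
        have hpt : probeA (nxt.insert s r).keys t = r := by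
          rw [hkeys, ← hp]
          exact (probeA_congr_interval nxt.keys t s (by omega)
            (fun z hz1 hz2 => hint z hz1 hz2)).symm
        obtain ⟨hk2, hI2⟩ := ih (nxt.insert s r) t hInv' hpt
        exact ⟨by rw [hk2, hkeys], hI2⟩

theorem insert_fresh_spec (nxt : PySem.Dict Int Int) (hInv : InvB nxt) (r : Int)
    (hr : r ∉ nxt.keys) :
    (nxt.insert r (r + 1)).keys = nxt.keys ++ [r] ∧ InvB (nxt.insert r (r + 1)) := by
  have hcont : nxt.contains r = false := by
    rw [PySem.Dict.contains_eq_decide_mem_keys]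
    simp [hr]
  have hkeys : (nxt.insert r (r + 1)).keys = nxt.keys ++ [r] :=
    PySem.Dict.keys_insert_of_not_contains nxt (r + 1) hcont
  refine ⟨hkeys, fun x y hxy => ?_⟩
  rw [PySem.Dict.get?_insert] at hxy
  by_cases hx : x = r
  · refine ⟨?_, ?_⟩
    · simp only [hx, if_true] at hxy
      cases hxy
      omega
    · intro z hz1 hz2
      simp only [hx, if_true] at hxy
      cases hxy
      have : z = x := by omega
      subst this
      rw [hkeys, hx]
      simp
  · simp only [hx, if_false] at hxy
    obtain ⟨h1, h2⟩ := hInv x y hxy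
    refine ⟨h1, fun z hz1 hz2 => ?_⟩
    rw [hkeys]
    exact List.mem_append_left _ (h2 z hz1 hz2)

theorem set_add_of_not_mem (s : PySem.Set Int) (x : Int) (h : x ∉ s) :
    PySem.Set.add s x = s ++ [x] := by
  unfold PySem.Set.add
  simp [h]

theorem loop_eq :
    ∀ (rest : List Int) (res : List Int) (nxt : PySem.Dict Int Int),
      InvB nxt →
      (rest.foldl dedupStepA (res, nxt.keys)).1 =
      ((PySem.List.enumerate rest (res.length : Int)).foldl dedupStepB (res, nxt)).1 := by
  intro rest
  induction rest with
  | nil => intro res nxt _; simp [PySem.List.enumerate_nil]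
  | cons seq rest ih =>
    intro res nxt hInv
    rw [PySem.List.enumerate_cons]
    simp only [List.foldl_cons]
    have hfuel : (nxt.keys.filter (fun x => decide ((if seq ≠ 0 then seq else (res.length : Int) + 1) ≤ x))).length < nxt.size + 1 := by
      have h1 := List.length_filter_le (fun x => decide ((if seq ≠ 0 then seq else (res.length : Int) + 1) ≤ x)) nxt.keys
      have h2 : nxt.keys.length = nxt.size := by
        simp [PySem.Dict.keys, PySem.Dict.size]
      omega
    have hroot : findRootB nxt (nxt.size + 1) (if seq ≠ 0 then seq else (res.length : Int) + 1) =
        probeA nxt.keys (if seq ≠ 0 then seq else (res.length : Int) + 1) :=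
      findRootB_eq nxt hInv (nxt.size + 1) _ hfuel
    obtain ⟨hck, hcI⟩ := compressB_keeps (probeA nxt.keys (if seq ≠ 0 then seq else (res.length : Int) + 1))
      (nxt.size + 1) nxt (if seq ≠ 0 then seq else (res.length : Int) + 1) hInv rfl
    have hrnot : probeA nxt.keys (if seq ≠ 0 then seq else (res.length : Int) + 1) ∉
        (compressB (probeA nxt.keys (if seq ≠ 0 then seq else (res.length : Int) + 1)) (nxt.size + 1) nxt
          (if seq ≠ 0 then seq else (res.length : Int) + 1)).keys := by
      rw [hck]
      exact probeA_not_mem nxt.keys _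
    obtain ⟨hik, hiI⟩ := insert_fresh_spec _ hcI _ hrnot
    have hstepA : dedupStepA (res, nxt.keys) seq =
        (res ++ [probeA nxt.keys (if seq ≠ 0 then seq else (res.length : Int) + 1)], nxt.keys ++ [probeA nxt.keys (if seq ≠ 0 then seq else (res.length : Int) + 1)]) := by
      unfold dedupStepA
      simp only
      rw [set_add_of_not_mem nxt.keys _ (probeA_not_mem nxt.keys _)]
    have hstepB : dedupStepB (res, nxt) ((res.length : Int), seq) =
        (res ++ [probeA nxt.keys (if seq ≠ 0 then seq else (res.length : Int) + 1)],
          (compressB (probeA nxt.keys (if seq ≠ 0 then seq else (res.length : Int) + 1)) (nxt.size + 1) nxt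
            (if seq ≠ 0 then seq else (res.length : Int) + 1)).insert
            (probeA nxt.keys (if seq ≠ 0 then seq else (res.length : Int) + 1))
            (probeA nxt.keys (if seq ≠ 0 then seq else (res.length : Int) + 1) + 1)) := by
      unfold dedupStepB
      simp only
      rw [hroot]
    rw [hstepA, hstepB]
    have hkeys2 : nxt.keys ++ [probeA nxt.keys (if seq ≠ 0 then seq else (res.length : Int) + 1)] =
        ((compressB (probeA nxt.keys (if seq ≠ 0 then seq else (res.length : Int) + 1)) (nxt.size + 1) nxt
          (if seq ≠ 0 then seq else (res.length : Int) + 1)).insert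
          (probeA nxt.keys (if seq ≠ 0 then seq else (res.length : Int) + 1))
          (probeA nxt.keys (if seq ≠ 0 then seq else (res.length : Int) + 1) + 1)).keys := by
      rw [hik, hck]
    rw [hkeys2]
    have hrec := ih (res ++ [probeA nxt.keys (if seq ≠ 0 then seq else (res.length : Int) + 1)]) _ hiI
    simpa [List.length_append, Int.natCast_add] using hrec

-- ===== VERDICT (by name: the statement is the Claim_ definition above) =====
theorem deduplicate_sequences_spec : Claim_equal_deduplicate_sequences := by
  intro sequences _
  unfold Spec_deduplicate_sequences deduplicate_sequences deduplicate_sequences_alt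
  have hInv : InvB PySem.Dict.empty := by
    intro x y hxy
    simp [PySem.Dict.get?_empty] at hxy
  have h := loop_eq sequences [] PySem.Dict.empty hInv
  simpa [PySem.Dict.keys_empty, PySem.Set.empty] using h
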